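-- pv_equiv track=rewrite | github.com/epfl-ada/ada-2023-project-adaccident-de-travail | sequel_scraper/sequel_scraper.py | extract_runtime
-- ===== SOURCE A (Python) =====
-- def extract_runtime(html_extract):
--     new_runtime = []
--     end_ID = False
--     start_ID = False
--     for i in range(len(html_extract)):
--         if start_ID == False:
--             if html_extract[i].isdigit():
--                 new_runtime.append(html_extract[i])
--                 start_ID = True
--         elif start_ID == True:
--             if end_ID == False:
--                 if html_extract[i] == '\n':
--                     break
--                 else:
--                     new_runtime.append(html_extract[i])
--     return new_runtime
-- ===== SOURCE B (Python) =====
-- def extract_runtime(html_extract):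
--     for i, c in enumerate(html_extract):
--         if c.isdigit():
--             tail = html_extract[i:]
--             j = tail.find('\n')
--             return list(tail) if j == -1 else list(tail[:j])
--     return []
-- ===== Notes on version B (the rewrite author's own statement) =====
-- stated objective: simpler
-- what changed: Replaces the flag-threaded character loop (start/end booleans, conditional appends) by locate-then-slice: find the first digit with enumerate, then cut the tail at str.find of the newline and return its characters.
import Mathlib
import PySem

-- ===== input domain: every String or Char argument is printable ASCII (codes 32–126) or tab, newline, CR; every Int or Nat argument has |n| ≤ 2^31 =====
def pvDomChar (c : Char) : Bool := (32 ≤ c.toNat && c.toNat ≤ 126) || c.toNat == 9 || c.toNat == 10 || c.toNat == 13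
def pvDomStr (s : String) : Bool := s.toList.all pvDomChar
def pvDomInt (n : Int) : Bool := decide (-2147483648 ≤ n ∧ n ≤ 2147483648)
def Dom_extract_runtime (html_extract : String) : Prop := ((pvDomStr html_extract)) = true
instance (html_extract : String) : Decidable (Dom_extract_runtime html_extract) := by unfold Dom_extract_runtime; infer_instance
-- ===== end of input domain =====

-- B replaces A's flag-threaded single pass by locate-first-digit, then str.find('\n') and a slice (simpler decomposition, same cost).

-- ===== PORT A =====
-- the for-loop over range(len(..)) with the start_ID flag and the break (end_ID never changes)
def extractGoA : List Char → Bool → List String → List String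
  | [], _, acc => acc
  | c :: rest, startID, acc =>
    if startID = false then
      if PySem.Chars.isdigit c then extractGoA rest true (acc ++ [String.ofList [c]])
      else extractGoA rest false acc
    else
      -- start_ID == True; end_ID is always False
      if c = '\n' then acc              -- break
      else extractGoA rest true (acc ++ [String.ofList [c]])

def extract_runtime (html_extract : String) : List String :=
  extractGoA html_extract.toList false []

-- ===== PORT B =====
-- the enumerate scan for the first digit; at position i the current suffix IS html_extract[i:]
def extractGoB : List Char → List String
  | [] => []
  | c :: rest =>
    if PySem.Chars.isdigit c then
      let tail : List Char := c :: rest                 -- tail = html_extract[i:]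
      let j : Int := PySem.Chars.find tail ['\n']       -- j = tail.find('\n')
      if j = -1 then tail.map (fun ch => String.ofList [ch])                                  -- list(tail)
      else (PySem.List.slice tail none (some j)).map (fun ch => String.ofList [ch])           -- list(tail[:j])
    else extractGoB rest

def extract_runtime_alt (html_extract : String) : List String :=
  extractGoB html_extract.toList

-- ===== PRECONDITION & SPEC =====
def Spec_extract_runtime (html_extract : String) (out : List String) : Prop := out = extract_runtime_alt html_extract
instance (html_extract : String) (out : List String) : Decidable (Spec_extract_runtime html_extract out) := by unfold Spec_extract_runtime; infer_instance

-- ===== CLAIM (what is proved, stated in full; the proofs are below) =====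
def Claim_equal_extract_runtime : Prop := ∀ (html_extract : String), Dom_extract_runtime html_extract → Spec_extract_runtime html_extract (extract_runtime html_extract)

-- ===== LEMMAS AND PROOFS =====

theorem singleton_prefix_iff {a : Char} {l : List Char} : [a] <+: l ↔ l.head? = some a := by
  cases l with
  | nil => simp
  | cons b t => simp [List.cons_prefix_cons, eq_comm]

theorem singleton_infix_iff {a : Char} {l : List Char} : [a] <:+: l ↔ a ∈ l := by
  constructor
  · intro h; exact List.singleton_sublist.mp h.sublist
  · intro h
    obtain ⟨s, t, rfl⟩ := List.append_of_mem h
    exact ⟨s, t, by simp⟩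

theorem takeWhile_eq_take_of_first {l : List Char} {n : Nat}
    (hlt : ∀ i, i < n → l[i]? ≠ some '\n') (hn : l[n]? = some '\n') :
    l.takeWhile (fun c => c ≠ '\n') = l.take n := by
  induction l generalizing n with
  | nil => simp at hn
  | cons c rest ih =>
    cases n with
    | zero =>
      simp at hn
      simp [hn]
    | succ m =>
      have hc : c ≠ '\n' := by
        have := hlt 0 (Nat.succ_pos m); simpa using this
      have ht : rest.takeWhile (fun c => decide (c ≠ '\n')) = rest.take m := by
        apply ih
        · intro i hi
          have := hlt (i + 1) (by omega)
          simpa using this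
        · simpa using hn
      simp only [List.takeWhile_cons]
      rw [if_pos (by simpa using hc), ht, List.take_succ_cons]

-- B's cut at find('\n') is exactly takeWhile (≠ '\n')
theorem cut_eq_takeWhile (l : List Char) :
    (if PySem.Chars.find l ['\n'] = -1 then l
     else PySem.List.slice l none (some (PySem.Chars.find l ['\n']))) =
    l.takeWhile (fun c => c ≠ '\n') := by
  by_cases h : PySem.Chars.find l ['\n'] = -1
  · rw [if_pos h]
    have hno : '\n' ∉ l := fun hm =>
      ((PySem.Chars.find_eq_neg_one_iff l ['\n']).mp h) (singleton_infix_iff.mpr hm)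
    symm
    rw [List.takeWhile_eq_self_iff]
    intro c hc
    simp only [decide_eq_true_eq]
    intro e; exact hno (e ▸ hc)
  · rw [if_neg h]
    have hnn : 0 ≤ PySem.Chars.find l ['\n'] := by
      have := PySem.Chars.neg_one_le_find l ['\n']
      omega
    obtain ⟨hpre, hmin⟩ := PySem.Chars.find_spec (s := l) (sub := ['\n']) hnn
    rw [PySem.List.slice_to l hnn]
    symm
    apply takeWhile_eq_take_of_first (n := (PySem.Chars.find l ['\n']).toNat)
    · intro i hi he
      apply hmin i hi
      rw [singleton_prefix_iff, List.head?_drop, he]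
    · have := singleton_prefix_iff.mp hpre
      rwa [List.head?_drop] at this

theorem isdigit_ne_newline {c : Char} (h : PySem.Chars.isdigit c = true) : c ≠ '\n' := by
  intro e; subst e; simp [PySem.Chars.isdigit] at h

-- collecting phase of A
theorem goA_true (cs : List Char) (acc : List String) :
    extractGoA cs true acc = acc ++ (cs.takeWhile (fun c => c ≠ '\n')).map (fun c => String.ofList [c]) := by
  induction cs generalizing acc with
  | nil => simp [extractGoA]
  | cons c rest ih =>
    by_cases hc : c = '\n'
    · subst hc; simp [extractGoA]
    · simp [extractGoA, hc, ih]

-- searching phase of A vs B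
theorem goA_false (cs : List Char) (acc : List String) :
    extractGoA cs false acc = acc ++ extractGoB cs := by
  induction cs generalizing acc with
  | nil => simp [extractGoA, extractGoB]
  | cons c rest ih =>
    by_cases hd : PySem.Chars.isdigit c = true
    · have hc : c ≠ '\n' := isdigit_ne_newline hd
      simp only [extractGoA, extractGoB, hd, if_pos]
      rw [goA_true,
        ← apply_ite (List.map (fun ch => String.ofList [ch])),
        cut_eq_takeWhile (c :: rest)]
      simp [hc]
    · simp only [extractGoA, extractGoB, hd, reduceIte, Bool.false_eq_true, if_false]
      exact ih acc

-- ===== VERDICT (by name: the statement is the Claim_ definition above) =====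
theorem extract_runtime_spec : Claim_equal_extract_runtime := by
  intro s _
  show extract_runtime s = extract_runtime_alt s
  unfold extract_runtime extract_runtime_alt
  simpa using goA_false s.toList []
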